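-- pv_equiv track=rewrite | github.com/murmursh/usless_bot | solver.py | backtrack_all
-- ===== SOURCE A (Python) =====
-- def backtrack_all(slots, words_dict, constraints, assignment=None, used=None, slot_idx=0, solutions=None):
--     if assignment is None:
--         assignment = {}
--     if used is None:
--         used = set()
--     if solutions is None:
--         solutions = []
--
--     if slot_idx == len(slots):
--         # Found full solution
--         solutions.append(assignment.copy())
--         return solutions
--
--     slot = slots[slot_idx]
--     length = len(slot)
--     candidates = words_dict.get(length, [])
--
--     for word in candidates:
--         if word in used:
--             continue
--
--         # Check constraints
--         ok = True
--         for (other, i1, i2) in constraints.get(slot_idx, []):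
--             if other in assignment:
--                 if assignment[other][i2] != word[i1]:
--                     ok = False
--                     break
--         if not ok:
--             continue
--
--         # Assign
--         assignment[slot_idx] = word
--         used.add(word)
--
--         backtrack_all(slots, words_dict, constraints, assignment, used, slot_idx + 1, solutions)
--
--         # Undo
--         del assignment[slot_idx]
--         used.remove(word)
--
--     return solutions
-- ===== SOURCE B (Python) =====
-- def backtrack_all(slots, words_dict, constraints, assignment=None, used=None, slot_idx=0, solutions=None):
--     if assignment is None:
--         assignment = {}
--     if used is None:
--         used = set()
--     if solutions is None:
--         solutions = []
--     n = len(slots)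
--     if slot_idx == n:
--         solutions.append(assignment.copy())
--         return solutions
--
--     def candidates(j):
--         return words_dict.get(len(slots[j]), [])
--
--     # Explicit iterative backtracker: stack of (slot index, iterator over its candidates).
--     stack = [(slot_idx, iter(candidates(slot_idx)))]
--     while stack:
--         j, it = stack[-1]
--         for word in it:
--             if word in used:
--                 continue
--             if any(assignment[other][i2] != word[i1]
--                    for (other, i1, i2) in constraints.get(j, [])
--                    if other in assignment):
--                 continue
--             assignment[j] = word
--             used.add(word)
--             if j + 1 == n:
--                 solutions.append(assignment.copy())
--                 del assignment[j]
--                 used.remove(word)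
--                 continue
--             stack.append((j + 1, iter(candidates(j + 1))))
--             break
--         else:
--             # this frame is exhausted: pop it and undo the parent's assignment
--             stack.pop()
--             if stack:
--                 pj = stack[-1][0]
--                 used.remove(assignment.pop(pj))
--     return solutions
-- ===== Notes on version B (the rewrite author's own statement) =====
-- stated objective: alternative
-- what changed: The recursive DFS is replaced by an explicit iterative backtracker: a manual stack of (slot index, candidate iterator) frames is pushed/advanced/popped in a single while loop, with the same candidate order, used-set and constraint checks, undo timing and solution order.
import Mathlib
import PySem

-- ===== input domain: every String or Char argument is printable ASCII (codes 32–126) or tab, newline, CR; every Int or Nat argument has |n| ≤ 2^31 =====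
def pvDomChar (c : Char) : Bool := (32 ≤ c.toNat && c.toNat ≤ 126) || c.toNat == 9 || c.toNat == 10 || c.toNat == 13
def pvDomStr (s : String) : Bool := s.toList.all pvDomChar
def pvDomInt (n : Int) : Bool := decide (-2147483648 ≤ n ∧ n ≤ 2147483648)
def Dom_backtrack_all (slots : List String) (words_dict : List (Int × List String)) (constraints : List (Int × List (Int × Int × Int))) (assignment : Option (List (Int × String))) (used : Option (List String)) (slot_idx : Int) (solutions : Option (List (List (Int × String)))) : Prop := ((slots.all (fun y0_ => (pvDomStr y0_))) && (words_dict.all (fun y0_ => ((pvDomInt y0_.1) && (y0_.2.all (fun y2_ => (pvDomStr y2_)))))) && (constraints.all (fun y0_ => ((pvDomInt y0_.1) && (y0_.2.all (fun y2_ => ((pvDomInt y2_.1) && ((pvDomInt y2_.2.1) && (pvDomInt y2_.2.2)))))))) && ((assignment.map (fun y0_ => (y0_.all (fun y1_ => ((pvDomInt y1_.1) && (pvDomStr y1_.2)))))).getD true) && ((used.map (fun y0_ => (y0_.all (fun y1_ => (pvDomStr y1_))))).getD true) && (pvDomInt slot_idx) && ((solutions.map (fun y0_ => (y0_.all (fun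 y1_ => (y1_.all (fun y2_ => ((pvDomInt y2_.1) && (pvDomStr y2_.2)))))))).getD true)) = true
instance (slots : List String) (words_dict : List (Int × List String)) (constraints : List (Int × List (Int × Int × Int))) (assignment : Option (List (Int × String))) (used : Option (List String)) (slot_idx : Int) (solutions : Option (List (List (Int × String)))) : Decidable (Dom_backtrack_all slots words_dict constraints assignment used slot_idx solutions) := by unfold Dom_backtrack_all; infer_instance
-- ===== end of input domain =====

-- B rewrites A's recursive DFS as an explicit iterative backtracker driving a stack of
-- (slot index, remaining candidates) frames — same candidate order, checks, undo timing
-- and solution order (objective: alternative decomposition, same asymptotic cost).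
-- NOTE on side effects: Python A mutates the caller's `solutions` list (appends) and
-- temporarily mutates `assignment`/`used`; the equivalence proved here is about the
-- RETURN value only (Python B performs the same mutations).

-- ---- termination-measure helpers (proof apparatus shared by both ports' measures) ----

-- 2 + the length of the longest candidate list in the dict: base of the exponential measure
def pvKbound (wd : PySem.Dict Int (List String)) : Nat :=
  2 + wd.values.foldl (fun a l => max a l.length) 0

-- ===== PORT A =====

-- the inner `for (other, i1, i2) in constraints.get(slot_idx, [])` check with its break
def pvA_ok (asg : PySem.Dict Int String) (cons : List (Int × Int × Int)) (word : String) : Bool :=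
  match cons with
  | [] => true
  | (other, i1, i2) :: rest =>
    if asg.contains other then
      -- Python: if assignment[other][i2] != word[i1]: ok = False; break
      -- (`assignment[other]` is present since `other in assignment`; an out-of-range
      -- char index would be a Python IndexError — excluded by Pre_)
      if PySem.Str.pyGet? ((asg.get? other).getD "") i2 ≠ PySem.Str.pyGet? word i1 then false
      else pvA_ok asg rest word
    else pvA_ok asg rest word

-- the `for word in candidates:` loop; `recur` is the recursive call for slot j+1
def pvA_loopF (cs : PySem.Dict Int (List (Int × Int × Int)))
    (recur : PySem.Dict Int String → PySem.Set String → List (List (Int × String)) →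
      PySem.Dict Int String × PySem.Set String × List (List (Int × String)))
    (cands : List String) (asg : PySem.Dict Int String) (used : PySem.Set String) (j : Int)
    (sols : List (List (Int × String))) :
    PySem.Dict Int String × PySem.Set String × List (List (Int × String)) :=
  match cands with
  | [] => (asg, used, sols)
  | word :: rest =>
    if used.contains word then
      pvA_loopF cs recur rest asg used j sols
    else if pvA_ok asg ((cs.get? j).getD []) word then
      let r := recur (asg.insert j word) (PySem.Set.add used word) sols
      -- undo: del assignment[slot_idx]; used.remove(word)
      -- (word was freshly added, so set.remove cannot raise; discard = remove here)
      pvA_loopF cs recur rest (r.1.erase j) (PySem.Set.discard r.2.1 word) j r.2.2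
    else
      pvA_loopF cs recur rest asg used j sols

-- the recursion of A; `fuel` only bounds the recursion DEPTH (slot indices climb to
-- len(slots)), so the wrapper's fuel is provably never exhausted — a totality guard only
def pvA_goF (slots : List String) (wd : PySem.Dict Int (List String))
    (cs : PySem.Dict Int (List (Int × Int × Int))) :
    Nat → PySem.Dict Int String → PySem.Set String → Int → List (List (Int × String)) →
    PySem.Dict Int String × PySem.Set String × List (List (Int × String))
  | 0, asg, used, _, sols => (asg, used, sols)   -- unreachable (see pvA_goF_eq)
  | fuel + 1, asg, used, j, sols =>
    if j = PySem.List.len slots then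
      (asg, used, sols ++ [asg.items])            -- solutions.append(assignment.copy())
    else
      match PySem.List.pyGet? slots j with
      | none => (asg, used, sols)                 -- slots[slot_idx]: IndexError — excluded by Pre_
      | some slot =>
        pvA_loopF cs (fun a u s => pvA_goF slots wd cs fuel a u (j + 1) s)
          ((wd.get? (PySem.Str.len slot)).getD []) asg used j sols

def backtrack_all (slots : List String) (words_dict : List (Int × List String)) (constraints : List (Int × List (Int × Int × Int))) (assignment : Option (List (Int × String))) (used : Option (List String)) (slot_idx : Int) (solutions : Option (List (List (Int × String)))) : List (List (Int × String)) :=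
  (pvA_goF slots (PySem.Dict.ofList words_dict) (PySem.Dict.ofList constraints)
    ((PySem.List.len slots - slot_idx).toNat + 1)
    (PySem.Dict.ofList (assignment.getD [])) (PySem.Set.ofList (used.getD []))
    slot_idx (solutions.getD [])).2.2

-- ===== PORT B =====

-- `candidates(j)` of Source B: words_dict.get(len(slots[j]), [])
def pvB_cands (slots : List String) (wd : PySem.Dict Int (List String)) (j : Int) : List String :=
  match PySem.List.pyGet? slots j with
  | none => []                                 -- slots[j]: IndexError — excluded by Pre_
  | some s => (wd.get? (PySem.Str.len s)).getD []

-- the `any(assignment[other][i2] != word[i1] for ... if other in assignment)` test of Source B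
def pvB_conflict (asg : PySem.Dict Int String) (cons : List (Int × Int × Int)) (word : String) : Bool :=
  cons.any (fun t =>
    asg.contains t.1 &&
      decide (PySem.Str.pyGet? ((asg.get? t.1).getD "") t.2.2 ≠ PySem.Str.pyGet? word t.2.1))

-- the `for word in it:` header of Source B: drain the top frame's iterator until a word is
-- assigned (returning `some (word, rest-of-iterator)`) or the iterator is exhausted (`none`);
-- full solutions found at j+1 == n are recorded and undone inside this scan, as in Source B.
def pvB_scan (cs : PySem.Dict Int (List (Int × Int × Int))) (n : Int) (j : Int)
    (rem : List String) (asg : PySem.Dict Int String) (used : PySem.Set String)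
    (sols : List (List (Int × String))) :
    Option (String × List String) × PySem.Dict Int String × PySem.Set String × List (List (Int × String)) :=
  match rem with
  | [] => (none, asg, used, sols)
  | word :: rest =>
    if used.contains word then pvB_scan cs n j rest asg used sols
    else if pvB_conflict asg ((cs.get? j).getD []) word then pvB_scan cs n j rest asg used sols
    else
      if j + 1 = n then
        pvB_scan cs n j rest ((asg.insert j word).erase j)
          (PySem.Set.discard (PySem.Set.add used word) word)
          (sols ++ [(asg.insert j word).items])
      else
        (some (word, rest), asg.insert j word, PySem.Set.add used word, sols)

-- the `while stack:` loop of Source B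
-- the `while stack:` loop of Source B; `fuel` bounds the number of loop iterations
-- (each iteration pushes or pops; the wrapper's fuel is provably never exhausted)
def pvB_runF (slots : List String) (wd : PySem.Dict Int (List String))
    (cs : PySem.Dict Int (List (Int × Int × Int))) (n : Int) :
    Nat → List (Int × List String) → PySem.Dict Int String → PySem.Set String →
    List (List (Int × String)) → List (List (Int × String))
  | 0, _, _, _, sols => sols                      -- unreachable (see pvB_runF_eq)
  | fuel + 1, stack, asg, used, sols =>
    match stack with
    | [] => sols
    | (j, rem) :: rest =>
      match pvB_scan cs n j rem asg used sols with
      | (some (_, rem'), asg', used', sols') =>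
        -- a word was assigned and j+1 < n: push a fresh frame for slot j+1
        pvB_runF slots wd cs n fuel ((j + 1, pvB_cands slots wd (j + 1)) :: (j, rem') :: rest)
          asg' used' sols'
      | (none, asg', used', sols') =>
        -- frame exhausted: pop; if a parent remains, undo its assignment and resume it
        match rest with
        | [] => sols'
        | (pj, prem) :: rrest =>
          -- Python: used.remove(assignment.pop(pj)); the key pj is always present here
          pvB_runF slots wd cs n fuel ((pj, prem) :: rrest) (asg'.erase pj)
            (PySem.Set.discard used' ((asg'.get? pj).getD "")) sols'

def backtrack_all_alt (slots : List String) (words_dict : List (Int × List String)) (constraints : List (Int × List (Int × Int × Int))) (assignment : Option (List (Int × String))) (used : Option (List String)) (slot_idx : Int) (solutions : Option (List (List (Int × String)))) : List (List (Int × String)) :=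
  let asg := PySem.Dict.ofList (assignment.getD [])
  let usedS := PySem.Set.ofList (used.getD [])
  let sols := solutions.getD []
  let wd := PySem.Dict.ofList words_dict
  if slot_idx = PySem.List.len slots then
    sols ++ [asg.items]
  else
    pvB_runF slots wd (PySem.Dict.ofList constraints) (PySem.List.len slots)
      (2 * ((pvB_cands slots wd slot_idx).length *
        pvKbound wd ^ ((PySem.List.len slots + 1 - slot_idx).toNat)) + 2)
      [(slot_idx, pvB_cands slots wd slot_idx)] asg usedS sols

-- ===== PRECONDITION & SPEC =====
-- Pre_ excludes exactly the inputs on which Python A raises an IndexError (a slot index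
-- outside [-len(slots), len(slots)], or a fired constraint whose char index falls outside
-- an indexed word) and, conservatively, inputs where a constraint on a reachable slot
-- carries an out-of-range char index that never dynamically fires while A still returns
-- (see cites).
def Pre_backtrack_all (slots : List String) (words_dict : List (Int × List String)) (constraints : List (Int × List (Int × Int × Int))) (assignment : Option (List (Int × String))) (used : Option (List String)) (slot_idx : Int) (solutions : Option (List (List (Int × String)))) : Prop :=
  (-(slots.length : Int) ≤ slot_idx ∧ slot_idx ≤ (slots.length : Int)) ∧
  (∀ p ∈ constraints,
    (slot_idx ≤ p.1 ∧ p.1 < (slots.length : Int)) →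
    ∀ t ∈ p.2,
      -- i1 indexes candidate words of the constrained slot
      (∀ q ∈ words_dict, q.1 = PySem.Str.len (PySem.List.pyGetD slots p.1 "") →
        ∀ w ∈ q.2, -(w.length : Int) ≤ t.2.1 ∧ t.2.1 < (w.length : Int)) ∧
      -- i2 indexes assignment[other]: an initial assignment entry at key other …
      (∀ pr ∈ assignment.getD [], pr.1 = t.1 →
        -(pr.2.length : Int) ≤ t.2.2 ∧ t.2.2 < (pr.2.length : Int)) ∧
      -- … or a word assigned to slot other during the search
      ((slot_idx ≤ t.1 ∧ t.1 < (slots.length : Int)) →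
        ∀ q ∈ words_dict, q.1 = PySem.Str.len (PySem.List.pyGetD slots t.1 "") →
        ∀ w ∈ q.2, -(w.length : Int) ≤ t.2.2 ∧ t.2.2 < (w.length : Int)))
instance (slots : List String) (words_dict : List (Int × List String)) (constraints : List (Int × List (Int × Int × Int))) (assignment : Option (List (Int × String))) (used : Option (List String)) (slot_idx : Int) (solutions : Option (List (List (Int × String)))) : Decidable (Pre_backtrack_all slots words_dict constraints assignment used slot_idx solutions) := by unfold Pre_backtrack_all; infer_instance

def pvWitness_backtrack_all : List String × (List (Int × List String)) × (List (Int × List (Int × Int × Int))) × (Option (List (Int × String))) × Option (List String) × Int × (Option (List (List (Int × String)))) :=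
  (["ab", "ba"], [(2, ["ab", "ba"])], [(1, [(0, 0, 1)])], none, none, 0, none)

def Spec_backtrack_all (slots : List String) (words_dict : List (Int × List String)) (constraints : List (Int × List (Int × Int × Int))) (assignment : Option (List (Int × String))) (used : Option (List String)) (slot_idx : Int) (solutions : Option (List (List (Int × String)))) (out : List (List (Int × String))) : Prop := out = backtrack_all_alt slots words_dict constraints assignment used slot_idx solutions
instance (slots : List String) (words_dict : List (Int × List String)) (constraints : List (Int × List (Int × Int × Int))) (assignment : Option (List (Int × String))) (used : Option (List String)) (slot_idx : Int) (solutions : Option (List (List (Int × String)))) (out : List (List (Int × String))) : Decidable (Spec_backtrack_all slots words_dict constraints assignment used slot_idx solutions out) := by unfold Spec_backtrack_all; infer_instance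

-- ===== CLAIM (what is proved, stated in full; the proofs are below) =====
def Claim_equal_backtrack_all : Prop := ∀ (slots : List String) (words_dict : List (Int × List String)) (constraints : List (Int × List (Int × Int × Int))) (assignment : Option (List (Int × String))) (used : Option (List String)) (slot_idx : Int) (solutions : Option (List (List (Int × String)))), Dom_backtrack_all slots words_dict constraints assignment used slot_idx solutions → Pre_backtrack_all slots words_dict constraints assignment used slot_idx solutions → Spec_backtrack_all slots words_dict constraints assignment used slot_idx solutions (backtrack_all slots words_dict constraints assignment used slot_idx solutions)

-- ===== LEMMAS AND PROOFS =====

theorem pvGetDLen (wd : PySem.Dict Int (List String)) (L : Int) :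
    ((wd.get? L).getD []).length + 2 ≤ pvKbound wd := by
  unfold pvKbound
  cases hg : wd.get? L with
  | none => simp
  | some v =>
    have hv : v ∈ wd.values := by
      have := PySem.Dict.mem_items_of_get?_eq_some wd hg
      simp only [PySem.Dict.values]
      exact List.mem_map_of_mem this
    have := (PySem.List.le_foldl_max_nat wd.values (fun l => List.length l) 0).2 v hv
    simp only [Option.getD_some]
    omega

theorem pvKbound_pos (wd : PySem.Dict Int (List String)) : 2 ≤ pvKbound wd := by
  unfold pvKbound; omega

theorem pvLtOfGet (slots : List String) (j : Int) (s : String)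
    (h : PySem.List.pyGet? slots j = some s) : j < (slots.length : Int) := by
  by_contra hc
  have hn : PySem.List.pyGet? slots j = none :=
    (PySem.List.pyGet?_eq_none_iff slots j).mpr (fun hIn => hc hIn.2)
  simp [hn] at h

theorem pvDecA1 (wd : PySem.Dict Int (List String)) (L j : Int) (C : Nat)
    (hC : C + 2 ≤ pvKbound wd) (hj : j < L) :
    2 * C * pvKbound wd ^ ((L - j).toNat) + 1 < 2 * pvKbound wd ^ ((L + 1 - j).toNat) := by
  have hK := pvKbound_pos wd
  have he : ((L + 1 - j).toNat) = ((L - j).toNat) + 1 := by omega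
  have h1 : 1 ≤ pvKbound wd ^ ((L - j).toNat) := Nat.one_le_pow _ _ (by omega)
  rw [he, pow_succ]
  nlinarith [Nat.mul_le_mul_right (pvKbound wd ^ ((L - j).toNat)) hC]

theorem pvDecA2 (wd : PySem.Dict Int (List String)) (L j : Int) (x : String) (l : List String) :
    2 * pvKbound wd ^ ((L + 1 - (j + 1)).toNat) < 2 * (x :: l).length * pvKbound wd ^ ((L - j).toNat) + 1 := by
  have he : ((L + 1 - (j + 1)).toNat) = ((L - j).toNat) := by omega
  rw [he]
  simp only [List.length_cons]
  have h1 : 1 ≤ pvKbound wd ^ ((L - j).toNat) :=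
    Nat.one_le_pow _ _ (by have := pvKbound_pos wd; omega)
  nlinarith

theorem pvDecA3 (wd : PySem.Dict Int (List String)) (L j : Int) (x : String) (l : List String) :
    2 * l.length * pvKbound wd ^ ((L - j).toNat) + 1 < 2 * (x :: l).length * pvKbound wd ^ ((L - j).toNat) + 1 := by
  simp only [List.length_cons]
  have h1 : 1 ≤ pvKbound wd ^ ((L - j).toNat) :=
    Nat.one_le_pow _ _ (by have := pvKbound_pos wd; omega)
  nlinarith

-- scanning consumes at least the assigned word (cited by pvB_run's decreasing_by)
theorem pvB_scan_some_lt (cs : PySem.Dict Int (List (Int × Int × Int))) (n j : Int) :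
    ∀ (rem : List String) (asg : PySem.Dict Int String) (used : PySem.Set String)
      (sols : List (List (Int × String))) (w : String) (rem' : List String)
      (rst : PySem.Dict Int String × PySem.Set String × List (List (Int × String))),
      pvB_scan cs n j rem asg used sols = (some (w, rem'), rst) → rem'.length < rem.length := by
  intro rem
  induction rem with
  | nil => intro _ _ _ _ _ _ h; simp [pvB_scan] at h
  | cons word rest ih =>
    intro asg used sols w rem' rst h
    simp only [pvB_scan] at h
    split at h
    · exact Nat.lt_trans (ih _ _ _ _ _ _ h) (by simp)
    · split at h
      · exact Nat.lt_trans (ih _ _ _ _ _ _ h) (by simp)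
      · split at h
        · exact Nat.lt_trans (ih _ _ _ _ _ _ h) (by simp)
        · simp only [Prod.mk.injEq, Option.some.injEq] at h
          obtain ⟨⟨_, hr⟩, _⟩ := h
          subst hr; simp

theorem pvB_cands_nil_of_gt (slots : List String) (wd : PySem.Dict Int (List String)) (i : Int)
    (h : (slots.length : Int) < i) : pvB_cands slots wd i = [] := by
  unfold pvB_cands
  have hn : PySem.List.pyGet? slots i = none :=
    (PySem.List.pyGet?_eq_none_iff slots i).mpr (by unfold PySem.Raise.InRange; omega)
  rw [hn]

theorem pvB_cands_len (slots : List String) (wd : PySem.Dict Int (List String)) (i : Int) :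
    (pvB_cands slots wd i).length + 2 ≤ pvKbound wd := by
  unfold pvB_cands
  cases PySem.List.pyGet? slots i with
  | none => have := pvKbound_pos wd; simpa using this
  | some s => exact pvGetDLen wd (PySem.Str.len s)

theorem pvDecB1 (slots : List String) (wd : PySem.Dict Int (List String)) (j : Int)
    (rem rem' : List String) (S RL : Nat) (hlt : rem'.length < rem.length) :
    2 * ((pvB_cands slots wd (j + 1)).length * pvKbound wd ^ (((slots.length : Int) + 1 - (j + 1)).toNat) +
        (rem'.length * pvKbound wd ^ (((slots.length : Int) + 1 - j).toNat) + S)) + (RL + 1 + 1) <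
      2 * (rem.length * pvKbound wd ^ (((slots.length : Int) + 1 - j).toNat) + S) + (RL + 1) := by
  have hK := pvKbound_pos wd
  by_cases hj : j ≤ (slots.length : Int)
  · have he : (((slots.length : Int) + 1 - j).toNat) = (((slots.length : Int) + 1 - (j + 1)).toNat) + 1 := by omega
    have hC := pvB_cands_len slots wd (j + 1)
    have h1 : 1 ≤ pvKbound wd ^ (((slots.length : Int) + 1 - (j + 1)).toNat) :=
      Nat.one_le_pow _ _ (by omega)
    rw [he, pow_succ]
    nlinarith [Nat.mul_le_mul_right (pvKbound wd ^ (((slots.length : Int) + 1 - (j + 1)).toNat)) hC,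
      Nat.mul_le_mul_right (pvKbound wd ^ (((slots.length : Int) + 1 - (j + 1)).toNat) * pvKbound wd) (Nat.succ_le_of_lt hlt)]
  · have hC : pvB_cands slots wd (j + 1) = [] := pvB_cands_nil_of_gt slots wd (j + 1) (by omega)
    have h1 : 1 ≤ pvKbound wd ^ (((slots.length : Int) + 1 - j).toNat) :=
      Nat.one_le_pow _ _ (by omega)
    rw [hC]
    simp only [List.length_nil, Nat.zero_mul]
    nlinarith

theorem pvDecB2 (slots : List String) (wd : PySem.Dict Int (List String)) (j : Int)
    (rem : List String) (S RL : Nat) :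
    2 * S + RL < 2 * (rem.length * pvKbound wd ^ (((slots.length : Int) + 1 - j).toNat) + S) + (RL + 1) := by
  linarith [Nat.zero_le (rem.length * pvKbound wd ^ (((slots.length : Int) + 1 - j).toNat))]


-- proof-side well-founded versions of the two recursions (the ports are the fuel-based
-- functions above; these are bridged to them by pvA_goF_eq / pvB_runF_eq)
mutual
def pvA_go (slots : List String) (wd : PySem.Dict Int (List String))
    (cs : PySem.Dict Int (List (Int × Int × Int))) (asg : PySem.Dict Int String)
    (used : PySem.Set String) (j : Int) (sols : List (List (Int × String))) :
    PySem.Dict Int String × PySem.Set String × List (List (Int × String)) :=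
  if j = PySem.List.len slots then
    (asg, used, sols ++ [asg.items])          -- solutions.append(assignment.copy())
  else
    match h : PySem.List.pyGet? slots j with
    | none => (asg, used, sols)               -- slots[slot_idx]: IndexError — excluded by Pre_
    | some slot =>
      pvA_loop slots wd cs ((wd.get? (PySem.Str.len slot)).getD []) asg used j sols
termination_by 2 * pvKbound wd ^ (((slots.length : Int) + 1 - j).toNat)
decreasing_by
  · exact pvDecA1 wd _ j _ (pvGetDLen wd (PySem.Str.len slot)) (pvLtOfGet slots j slot h)

def pvA_loop (slots : List String) (wd : PySem.Dict Int (List String))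
    (cs : PySem.Dict Int (List (Int × Int × Int))) (cands : List String)
    (asg : PySem.Dict Int String) (used : PySem.Set String) (j : Int)
    (sols : List (List (Int × String))) :
    PySem.Dict Int String × PySem.Set String × List (List (Int × String)) :=
  match cands with
  | [] => (asg, used, sols)
  | word :: rest =>
    if used.contains word then
      pvA_loop slots wd cs rest asg used j sols
    else if pvA_ok asg ((cs.get? j).getD []) word then
      let r := pvA_go slots wd cs (asg.insert j word) (PySem.Set.add used word) (j + 1) sols
      -- undo: del assignment[slot_idx]; used.remove(word)
      -- (word was freshly added, so set.remove cannot raise; discard = remove here)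
      pvA_loop slots wd cs rest (r.1.erase j) (PySem.Set.discard r.2.1 word) j r.2.2
    else
      pvA_loop slots wd cs rest asg used j sols
termination_by 2 * cands.length * pvKbound wd ^ (((slots.length : Int) - j).toNat) + 1
decreasing_by
  · exact pvDecA3 wd _ j word rest
  · exact pvDecA2 wd _ j word rest
  · exact pvDecA3 wd _ j word rest
  · exact pvDecA3 wd _ j word rest
end


def pvB_run (slots : List String) (wd : PySem.Dict Int (List String))
    (cs : PySem.Dict Int (List (Int × Int × Int))) (n : Int)
    (stack : List (Int × List String)) (asg : PySem.Dict Int String)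
    (used : PySem.Set String) (sols : List (List (Int × String))) :
    List (List (Int × String)) :=
  match stack with
  | [] => sols
  | (j, rem) :: rest =>
    match hr : pvB_scan cs n j rem asg used sols with
    | (some (_, rem'), asg', used', sols') =>
      -- a word was assigned and j+1 < n: push a fresh frame for slot j+1
      pvB_run slots wd cs n ((j + 1, pvB_cands slots wd (j + 1)) :: (j, rem') :: rest)
        asg' used' sols'
    | (none, asg', used', sols') =>
      -- frame exhausted: pop; if a parent remains, undo its assignment and resume it
      match rest with
      | [] => sols'
      | (pj, prem) :: rrest =>
        -- Python: used.remove(assignment.pop(pj)); the key pj is always present here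
        pvB_run slots wd cs n ((pj, prem) :: rrest) (asg'.erase pj)
          (PySem.Set.discard used' ((asg'.get? pj).getD "")) sols'
termination_by
  2 * (stack.map (fun f => f.2.length * pvKbound wd ^ (((slots.length : Int) + 1 - f.1).toNat))).sum + stack.length
decreasing_by
  · -- push
    have hlt : rem'.length < rem.length := pvB_scan_some_lt cs n j rem asg used sols _ _ _ hr
    simp only [List.map_cons, List.sum_cons, List.length_cons]
    exact pvDecB1 slots wd j rem rem' _ _ hlt
  · -- pop
    simp only [List.map_cons, List.sum_cons, List.length_cons]
    exact pvDecB2 slots wd j rem _ _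



theorem pvOk_eq_not_conflict (asg : PySem.Dict Int String) (cons : List (Int × Int × Int)) (word : String) :
    pvA_ok asg cons word = !pvB_conflict asg cons word := by
  induction cons with
  | nil => simp [pvA_ok, pvB_conflict]
  | cons t rest ih =>
    obtain ⟨other, i1, i2⟩ := t
    simp only [pvA_ok, pvB_conflict, List.any_cons] at *
    by_cases hc : asg.contains other <;>
      by_cases hne : PySem.Str.pyGet? ((asg.get? other).getD "") i2 ≠ PySem.Str.pyGet? word i1 <;>
      simp [hc, hne, ih, pvB_conflict]

theorem pvFindFilter (k k' : Int) (h : k' ≠ k) : ∀ l : List (Int × String),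
    List.find? (fun p => p.1 == k') (l.filter (fun p => !p.1 == k)) = List.find? (fun p => p.1 == k') l := by
  intro l
  induction l with
  | nil => rfl
  | cons p l ih =>
    by_cases hk : p.1 = k
    · rw [List.filter_cons_of_neg (by simp [hk]), List.find?_cons_of_neg (by simp [hk]; omega)]
      exact ih
    · rw [List.filter_cons_of_pos (by simp [hk])]
      by_cases hk' : p.1 = k'
      · rw [List.find?_cons_of_pos (by simp [hk']), List.find?_cons_of_pos (by simp [hk'])]
      · rw [List.find?_cons_of_neg (by simp [hk']), List.find?_cons_of_neg (by simp [hk'])]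
        exact ih

theorem pvDict_get?_erase_ne (d : PySem.Dict Int String) (k k' : Int) (h : k' ≠ k) :
    (d.erase k).get? k' = d.get? k' := by
  simp only [PySem.Dict.erase, PySem.Dict.get?]
  rw [pvFindFilter k k' h d.items]

theorem pvA_go_eq_loop (slots : List String) (wd : PySem.Dict Int (List String))
    (cs : PySem.Dict Int (List (Int × Int × Int))) (asg : PySem.Dict Int String)
    (used : PySem.Set String) (j : Int) (sols : List (List (Int × String)))
    (h : j ≠ PySem.List.len slots) :
    pvA_go slots wd cs asg used j sols = pvA_loop slots wd cs (pvB_cands slots wd j) asg used j sols := by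
  rw [pvA_go]
  simp only [h, if_false]
  unfold pvB_cands
  cases hg : PySem.List.pyGet? slots j with
  | none => simp [pvA_loop]
  | some s => rfl

-- the candidate loop at slot j never changes the assignment at a key below j
theorem pvA_loop_get?_lt (slots : List String) (wd : PySem.Dict Int (List String))
    (cs : PySem.Dict Int (List (Int × Int × Int))) (N : Nat) :
    ∀ (j : Int) (cands : List String) (asg : PySem.Dict Int String) (used : PySem.Set String)
      (sols : List (List (Int × String))) (k : Int),
      2 * cands.length * pvKbound wd ^ (((slots.length : Int) + 1 - j).toNat) ≤ N → k < j →
      (pvA_loop slots wd cs cands asg used j sols).1.get? k = asg.get? k := by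
  induction N with
  | zero =>
    intro j cands asg used sols k hm hk
    have h1 : 1 ≤ pvKbound wd ^ (((slots.length : Int) + 1 - j).toNat) :=
      Nat.one_le_pow _ _ (by have := pvKbound_pos wd; omega)
    have : cands.length = 0 := by nlinarith
    rw [List.length_eq_zero_iff] at this
    subst this
    simp [pvA_loop]
  | succ N ih =>
    intro j cands asg used sols k hm hk
    match cands with
    | [] => simp [pvA_loop]
    | word :: rest =>
      have h1 : 1 ≤ pvKbound wd ^ (((slots.length : Int) + 1 - j).toNat) :=
        Nat.one_le_pow _ _ (by have := pvKbound_pos wd; omega)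
      have hrest : 2 * rest.length * pvKbound wd ^ (((slots.length : Int) + 1 - j).toNat) ≤ N := by
        simp only [List.length_cons] at hm; nlinarith
      rw [pvA_loop]
      by_cases hu : used.contains word
      · simp only [hu, if_true]; exact ih j rest asg used sols k hrest hk
      · simp only [hu, if_false]
        by_cases hok : pvA_ok asg ((cs.get? j).getD []) word
        · simp only [hok, if_true]
          have hins : ∀ (r : PySem.Dict Int String × PySem.Set String × List (List (Int × String))),
              r.1.get? k = asg.get? k →
              (pvA_loop slots wd cs rest (r.1.erase j) (PySem.Set.discard r.2.1 word) j r.2.2).1.get? k = asg.get? k := by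
            intro r hr
            rw [ih j rest _ _ _ k hrest hk, pvDict_get?_erase_ne _ _ _ (by omega), hr]
          apply hins
          -- the recursive call's resulting assignment at key k < j
          by_cases hn : j + 1 = PySem.List.len slots
          · rw [pvA_go]
            simp only [hn, if_true]
            exact PySem.Dict.get?_insert_of_ne asg word (by omega)
          · rw [pvA_go_eq_loop slots wd cs _ _ _ _ hn]
            have hmeas : 2 * (pvB_cands slots wd (j + 1)).length * pvKbound wd ^ (((slots.length : Int) + 1 - (j + 1)).toNat) ≤ N := by
              have hK := pvKbound_pos wd
              by_cases hj : j ≤ (slots.length : Int)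
              · have he : (((slots.length : Int) + 1 - j).toNat) = (((slots.length : Int) + 1 - (j + 1)).toNat) + 1 := by omega
                have hC := pvB_cands_len slots wd (j + 1)
                have h2 : 1 ≤ pvKbound wd ^ (((slots.length : Int) + 1 - (j + 1)).toNat) :=
                  Nat.one_le_pow _ _ (by omega)
                rw [he, pow_succ] at hm
                simp only [List.length_cons] at hm
                nlinarith [Nat.mul_le_mul_right (pvKbound wd ^ (((slots.length : Int) + 1 - (j + 1)).toNat)) hC,
                  Nat.le_mul_of_pos_left (pvKbound wd ^ (((slots.length : Int) + 1 - (j + 1)).toNat) * pvKbound wd) (Nat.succ_pos rest.length)]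
              · rw [pvB_cands_nil_of_gt slots wd (j + 1) (by omega)]
                simp only [List.length_nil, Nat.mul_zero, Nat.zero_mul]
                omega
            rw [ih (j + 1) (pvB_cands slots wd (j + 1)) _ _ _ k hmeas (by omega)]
            exact PySem.Dict.get?_insert_of_ne asg word (by omega)
        · simp only [hok, if_false]; exact ih j rest asg used sols k hrest hk

-- what pvB_run does after finishing a frame, as a function of the A-side loop result
def pvCont (slots : List String) (wd : PySem.Dict Int (List String))
    (cs : PySem.Dict Int (List (Int × Int × Int))) (rest : List (Int × List String))
    (r : PySem.Dict Int String × PySem.Set String × List (List (Int × String))) :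
    List (List (Int × String)) :=
  match rest with
  | [] => r.2.2
  | (pj, prem) :: rrest =>
    pvB_run slots wd cs (PySem.List.len slots) ((pj, prem) :: rrest) (r.1.erase pj)
      (PySem.Set.discard r.2.1 ((r.1.get? pj).getD "")) r.2.2

-- non-dependent unfolding of one pvB_run step (the definitional match is dependent,
-- which blocks rewriting its scrutinee)
theorem pvB_run_eq (slots : List String) (wd : PySem.Dict Int (List String))
    (cs : PySem.Dict Int (List (Int × Int × Int))) (n : Int) (j : Int) (rem : List String)
    (rest : List (Int × List String)) (asg : PySem.Dict Int String) (used : PySem.Set String)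
    (sols : List (List (Int × String))) :
    pvB_run slots wd cs n ((j, rem) :: rest) asg used sols =
      (fun res : Option (String × List String) × PySem.Dict Int String × PySem.Set String × List (List (Int × String)) =>
        match res with
        | (some (_, rem'), asg', used', sols') =>
          pvB_run slots wd cs n ((j + 1, pvB_cands slots wd (j + 1)) :: (j, rem') :: rest) asg' used' sols'
        | (none, asg', used', sols') =>
          match rest with
          | [] => sols'
          | (pj, prem) :: rrest =>
            pvB_run slots wd cs n ((pj, prem) :: rrest) (asg'.erase pj)
              (PySem.Set.discard used' ((asg'.get? pj).getD "")) sols')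
      (pvB_scan cs n j rem asg used sols) := by
  rw [pvB_run]
  split
  · rename_i heq; rw [heq]
  · rename_i heq; rw [heq]

-- MAIN LEMMA: running the B machine on a top frame for slot j is the A candidate loop
-- for slot j followed by the pop/undo continuation
theorem pvMain (slots : List String) (wd : PySem.Dict Int (List String))
    (cs : PySem.Dict Int (List (Int × Int × Int))) (N : Nat) :
    ∀ (j : Int) (rem : List String) (rest : List (Int × List String))
      (asg : PySem.Dict Int String) (used : PySem.Set String) (sols : List (List (Int × String))),
      2 * rem.length * pvKbound wd ^ (((slots.length : Int) + 1 - j).toNat) ≤ N →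
      pvB_run slots wd cs (PySem.List.len slots) ((j, rem) :: rest) asg used sols =
        pvCont slots wd cs rest (pvA_loop slots wd cs rem asg used j sols) := by
  induction N with
  | zero =>
    intro j rem rest asg used sols hm
    have h1 : 1 ≤ pvKbound wd ^ (((slots.length : Int) + 1 - j).toNat) :=
      Nat.one_le_pow _ _ (by have := pvKbound_pos wd; omega)
    have : rem.length = 0 := by nlinarith
    rw [List.length_eq_zero_iff] at this
    subst this
    rw [pvB_run]
    simp only [pvB_scan, pvA_loop]
    cases rest with
    | nil => simp [pvCont]
    | cons p rrest => obtain ⟨pj, prem⟩ := p; simp [pvCont]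
  | succ N ih =>
    intro j rem rest asg used sols hm
    match rem with
    | [] =>
      rw [pvB_run]
      simp only [pvB_scan, pvA_loop]
      cases rest with
      | nil => simp [pvCont]
      | cons p rrest => obtain ⟨pj, prem⟩ := p; simp [pvCont]
    | word :: rest' =>
      have h1 : 1 ≤ pvKbound wd ^ (((slots.length : Int) + 1 - j).toNat) :=
        Nat.one_le_pow _ _ (by have := pvKbound_pos wd; omega)
      have hrest : 2 * rest'.length * pvKbound wd ^ (((slots.length : Int) + 1 - j).toNat) ≤ N := by
        simp only [List.length_cons] at hm; nlinarith
      by_cases hu : word ∈ used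
      · -- skip: word in used
        have hs : pvB_scan cs (PySem.List.len slots) j (word :: rest') asg used sols =
            pvB_scan cs (PySem.List.len slots) j rest' asg used sols := by
          rw [pvB_scan]; simp [hu]
        rw [pvB_run_eq, hs, ← pvB_run_eq]
        rw [ih j rest' rest asg used sols hrest]
        conv_rhs => rw [pvA_loop]
        simp [hu]
      · by_cases hok : pvA_ok asg ((cs.get? j).getD []) word
        · have hcf : pvB_conflict asg ((cs.get? j).getD []) word = false := by
            rw [pvOk_eq_not_conflict] at hok; simpa using hok
          by_cases hn : j + 1 = PySem.List.len slots
          · -- accepted word completing a full solution: record and keep scanning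
            have hn' : j + 1 = (slots.length : Int) := by
              rw [PySem.List.len_eq] at hn; exact hn
            have hs : pvB_scan cs (PySem.List.len slots) j (word :: rest') asg used sols =
                pvB_scan cs (PySem.List.len slots) j rest' ((asg.insert j word).erase j)
                  (PySem.Set.discard (PySem.Set.add used word) word)
                  (sols ++ [(asg.insert j word).items]) := by
              rw [pvB_scan]; simp [hu, hcf, hn']
            rw [pvB_run_eq, hs, ← pvB_run_eq]
            rw [ih j rest' rest _ _ _ (by simpa using hrest)]
            conv_rhs => rw [pvA_loop]
            simp only [hu, decide_false, Bool.false_eq_true, if_false, hok, if_true,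
              PySem.Set.contains_eq_listContains, List.contains_eq_mem, decide_eq_true_eq]
            rw [pvA_go]
            simp [hn']
          · -- accepted word with more slots to fill: B pushes a frame, A recurses
            have hn' : ¬(j + 1 = (slots.length : Int)) := by
              rw [PySem.List.len_eq] at hn; exact hn
            have hs : pvB_scan cs (PySem.List.len slots) j (word :: rest') asg used sols =
                (some (word, rest'), asg.insert j word, PySem.Set.add used word, sols) := by
              rw [pvB_scan]; simp [hu, hcf, hn']
            rw [pvB_run_eq, hs]
            show pvB_run slots wd cs (PySem.List.len slots)
                ((j + 1, pvB_cands slots wd (j + 1)) :: (j, rest') :: rest)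
                (asg.insert j word) (PySem.Set.add used word) sols = _
            have hmeas : 2 * (pvB_cands slots wd (j + 1)).length * pvKbound wd ^ (((slots.length : Int) + 1 - (j + 1)).toNat) ≤ N := by
              have hK := pvKbound_pos wd
              by_cases hj : j ≤ (slots.length : Int)
              · have he : (((slots.length : Int) + 1 - j).toNat) = (((slots.length : Int) + 1 - (j + 1)).toNat) + 1 := by omega
                have hC := pvB_cands_len slots wd (j + 1)
                have h2 : 1 ≤ pvKbound wd ^ (((slots.length : Int) + 1 - (j + 1)).toNat) :=
                  Nat.one_le_pow _ _ (by omega)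
                rw [he, pow_succ] at hm
                simp only [List.length_cons] at hm
                nlinarith [Nat.mul_le_mul_right (pvKbound wd ^ (((slots.length : Int) + 1 - (j + 1)).toNat)) hC,
                  Nat.le_mul_of_pos_left (pvKbound wd ^ (((slots.length : Int) + 1 - (j + 1)).toNat) * pvKbound wd) (Nat.succ_pos rest'.length)]
              · rw [pvB_cands_nil_of_gt slots wd (j + 1) (by omega)]
                simp only [List.length_nil, Nat.mul_zero, Nat.zero_mul]
                omega
            rw [ih (j + 1) (pvB_cands slots wd (j + 1)) ((j, rest') :: rest) _ _ _ hmeas]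
            set r := pvA_loop slots wd cs (pvB_cands slots wd (j + 1)) (asg.insert j word)
              (PySem.Set.add used word) (j + 1) sols with hrdef
            have hrk : r.1.get? j = some word := by
              rw [hrdef]
              rw [pvA_loop_get?_lt slots wd cs _ (j + 1) _ _ _ _ j (le_refl _) (by omega)]
              exact PySem.Dict.get?_insert_self asg j word
            rw [pvCont]
            simp only [hrk, Option.getD_some]
            rw [ih j rest' rest (r.1.erase j) (PySem.Set.discard r.2.1 word) r.2.2 hrest]
            -- A side: one step of the loop
            conv_rhs => rw [pvA_loop]
            simp only [hu, decide_false, Bool.false_eq_true, if_false, hok, if_true,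
              PySem.Set.contains_eq_listContains, List.contains_eq_mem, decide_eq_true_eq]
            rw [pvA_go_eq_loop slots wd cs _ _ _ _ hn]
        · -- skip: constraint conflict
          have hcf : pvB_conflict asg ((cs.get? j).getD []) word = true := by
            rw [pvOk_eq_not_conflict] at hok; simpa using hok
          have hs : pvB_scan cs (PySem.List.len slots) j (word :: rest') asg used sols =
              pvB_scan cs (PySem.List.len slots) j rest' asg used sols := by
            rw [pvB_scan]; simp [hu, hcf]
          rw [pvB_run_eq, hs, ← pvB_run_eq]
          rw [ih j rest' rest asg used sols hrest]
          conv_rhs => rw [pvA_loop]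
          simp [hu, hok]


-- ---- fuel sufficiency: the fuel-based ports equal the well-founded versions ----

theorem pvA_loopF_eq (slots : List String) (wd : PySem.Dict Int (List String))
    (cs : PySem.Dict Int (List (Int × Int × Int))) (j : Int)
    (recur : PySem.Dict Int String → PySem.Set String → List (List (Int × String)) →
      PySem.Dict Int String × PySem.Set String × List (List (Int × String)))
    (hrec : ∀ a u s, recur a u s = pvA_go slots wd cs a u (j + 1) s) :
    ∀ (cands : List String) (asg : PySem.Dict Int String) (used : PySem.Set String)
      (sols : List (List (Int × String))),
      pvA_loopF cs recur cands asg used j sols = pvA_loop slots wd cs cands asg used j sols := by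
  intro cands
  induction cands with
  | nil => intro asg used sols; rw [pvA_loopF, pvA_loop]
  | cons word rest ih =>
    intro asg used sols
    rw [pvA_loopF]
    conv_rhs => rw [pvA_loop]
    by_cases hu : used.contains word
    · simp only [hu, if_true]; exact ih asg used sols
    · simp only [hu, Bool.false_eq_true, if_false]
      by_cases hok : pvA_ok asg ((cs.get? j).getD []) word
      · simp only [hok, if_true, hrec]
        exact ih _ _ _
      · simp only [hok, Bool.false_eq_true, if_false]; exact ih asg used sols

theorem pvA_goF_eq (slots : List String) (wd : PySem.Dict Int (List String))
    (cs : PySem.Dict Int (List (Int × Int × Int))) :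
    ∀ (fuel : Nat) (j : Int) (asg : PySem.Dict Int String) (used : PySem.Set String)
      (sols : List (List (Int × String))),
      ((slots.length : Int) - j).toNat + 1 ≤ fuel →
      pvA_goF slots wd cs fuel asg used j sols = pvA_go slots wd cs asg used j sols := by
  intro fuel
  induction fuel with
  | zero => intro j asg used sols hf; omega
  | succ fuel ih =>
    intro j asg used sols hf
    rw [pvA_goF, pvA_go]
    by_cases hj : j = PySem.List.len slots
    · simp [hj]
    · simp only [hj, if_false]
      cases hg : PySem.List.pyGet? slots j with
      | none => rfl
      | some slot =>
        have hlt : j < (slots.length : Int) := pvLtOfGet slots j slot hg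
        exact pvA_loopF_eq slots wd cs j _
          (fun a u s => ih (j + 1) a u s (by omega)) _ asg used sols

-- the loop measure of the B machine, as a function (bounds the number of iterations)
def pvBM (slots : List String) (wd : PySem.Dict Int (List String))
    (stack : List (Int × List String)) : Nat :=
  2 * (stack.map (fun f => f.2.length * pvKbound wd ^ (((slots.length : Int) + 1 - f.1).toNat))).sum + stack.length

theorem pvB_runF_eq (slots : List String) (wd : PySem.Dict Int (List String))
    (cs : PySem.Dict Int (List (Int × Int × Int))) (n : Int) :
    ∀ (fuel : Nat) (stack : List (Int × List String)) (asg : PySem.Dict Int String)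
      (used : PySem.Set String) (sols : List (List (Int × String))),
      pvBM slots wd stack + 1 ≤ fuel →
      pvB_runF slots wd cs n fuel stack asg used sols = pvB_run slots wd cs n stack asg used sols := by
  intro fuel
  induction fuel with
  | zero => intro stack asg used sols hf; omega
  | succ fuel ih =>
    intro stack asg used sols hf
    match stack with
    | [] => rw [pvB_runF, pvB_run]
    | (j, rem) :: rest =>
      rw [pvB_runF, pvB_run_eq]
      cases hsc : pvB_scan cs n j rem asg used sols with
      | mk o r3 =>
        match o, r3 with
        | some (w, rem'), (asg', used', sols') =>
          have hlt : rem'.length < rem.length := pvB_scan_some_lt cs n j rem asg used sols _ _ _ hsc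
          have hm : pvBM slots wd ((j + 1, pvB_cands slots wd (j + 1)) :: (j, rem') :: rest) + 1 ≤ fuel := by
            have hd := pvDecB1 slots wd j rem rem'
              ((rest.map (fun f => f.2.length * pvKbound wd ^ (((slots.length : Int) + 1 - f.1).toNat))).sum)
              rest.length hlt
            unfold pvBM at hf ⊢
            simp only [List.map_cons, List.sum_cons, List.length_cons] at hf ⊢
            omega
          exact ih _ asg' used' sols' hm
        | none, (asg', used', sols') =>
          match rest with
          | [] => rfl
          | (pj, prem) :: rrest =>
            have hm : pvBM slots wd ((pj, prem) :: rrest) + 1 ≤ fuel := by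
              have hd := pvDecB2 slots wd j rem
                (((((pj, prem) :: rrest)).map (fun f => f.2.length * pvKbound wd ^ (((slots.length : Int) + 1 - f.1).toNat))).sum)
                (((pj, prem) :: rrest)).length
              unfold pvBM at hf ⊢
              simp only [List.map_cons, List.sum_cons, List.length_cons] at hf hd ⊢
              omega
            exact ih _ _ _ _ hm

-- ===== VERDICT (by name: the statement is the Claim_ definition above) =====
theorem backtrack_all_spec : Claim_equal_backtrack_all := by
  intro slots words_dict constraints assignment used slot_idx solutions _hdom _hpre
  unfold Spec_backtrack_all backtrack_all backtrack_all_alt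
  rw [pvA_goF_eq slots (PySem.Dict.ofList words_dict) (PySem.Dict.ofList constraints) _
    slot_idx _ _ _ (by rw [PySem.List.len_eq])]
  by_cases h : slot_idx = PySem.List.len slots
  · rw [pvA_go]
    simp [h]
  · simp only [h, if_false]
    rw [pvB_runF_eq slots (PySem.Dict.ofList words_dict) (PySem.Dict.ofList constraints)
      (PySem.List.len slots) _ _ _ _ _
      (by unfold pvBM; simp [PySem.List.len_eq]; try omega)]
    rw [pvA_go_eq_loop _ _ _ _ _ _ _ h]
    rw [pvMain slots (PySem.Dict.ofList words_dict) (PySem.Dict.ofList constraints) _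
      slot_idx (pvB_cands slots (PySem.Dict.ofList words_dict) slot_idx) []
      (PySem.Dict.ofList (assignment.getD [])) (PySem.Set.ofList (used.getD []))
      (solutions.getD []) (le_refl _)]
    rfl
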